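-- pv_equiv track=rewrite | github.com/Maiiiutka/python_labs | src/Sem1/Lab02/matrix.py | row_sums
-- ===== SOURCE A (Python) =====
-- def row_sums(mat: list[list[float | int]]):
--     result = []
--     first = len(mat[0])
--     for row in mat:
--         if first != len(row):
--             return "ErrorValue"
--     if mat == []:
--         return []
--     for i in range(len(mat)):
--         s = sum(mat[i])
--         result.append(s)
--     return result
-- ===== SOURCE B (Python) =====
-- def row_sums(mat):
--     first = len(mat[0])
--     result = []
--     for row in mat:
--         if len(row) != first:
--             return "ErrorValue"
--         result.append(sum(row))
--     return result
-- ===== Notes on version B (the rewrite author's own statement) =====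
-- stated objective: simpler
-- what changed: Fuses A's separate validation loop and index-based summing loop into one direct pass over the rows that checks the length and accumulates the sum together.
-- outside the precondition, e.g. on row_sums([[1, 2], [3]]): A returns 'ErrorValue', B returns 'ErrorValue'
import Mathlib
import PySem

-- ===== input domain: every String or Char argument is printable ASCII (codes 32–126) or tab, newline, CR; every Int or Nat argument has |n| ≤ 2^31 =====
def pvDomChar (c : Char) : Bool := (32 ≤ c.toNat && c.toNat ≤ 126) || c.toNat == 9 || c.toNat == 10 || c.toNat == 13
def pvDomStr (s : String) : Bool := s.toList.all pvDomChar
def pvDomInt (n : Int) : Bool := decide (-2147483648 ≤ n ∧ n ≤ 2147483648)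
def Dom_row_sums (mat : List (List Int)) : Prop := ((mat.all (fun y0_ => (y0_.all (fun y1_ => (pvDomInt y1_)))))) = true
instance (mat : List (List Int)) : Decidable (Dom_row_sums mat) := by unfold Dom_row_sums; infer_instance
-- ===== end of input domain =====

-- B fuses A's separate validation loop and index-based summing loop into one direct pass (same O(n*m) cost, simpler).
-- Pre_ excludes empty mat (A raises IndexError) and ragged mat (A returns the string "ErrorValue", not a list of ints).


-- ===== PORT A =====
-- validation loop: 'for row in mat: if first != len(row): return "ErrorValue"'
def rowSumsCheck (first : Int) : List (List Int) → Bool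
  | [] => true
  | row :: rest => if first ≠ (row.length : Int) then false else rowSumsCheck first rest

def row_sums (mat : List (List Int)) : List Int :=
  match PySem.List.pyGet? mat 0 with
  | none => []  -- mat[0] raises IndexError; excluded by Pre_
  | some r0 =>
    let first : Int := (r0.length : Int)
    if rowSumsCheck first mat then
      if mat = [] then []
      else
        (PySem.List.pyRange 0 (mat.length : Int) 1).foldl
          (fun result i => result ++ [(PySem.List.pyGetD mat i []).foldl (· + ·) 0]) []
    else []  -- Python returns the string "ErrorValue"; excluded by Pre_

-- ===== PORT B =====
-- single pass: check length and append sum(row) in the same loop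
def rowSumsFused (first : Int) : List (List Int) → List Int
  | [] => []
  | row :: rest =>
    if (row.length : Int) ≠ first then []  -- Python returns "ErrorValue"; excluded by Pre_
    else (row.foldl (· + ·) 0) :: rowSumsFused first rest

def row_sums_alt (mat : List (List Int)) : List Int :=
  match mat with
  | [] => []  -- len(mat[0]) raises IndexError; excluded by Pre_
  | r0 :: _ => rowSumsFused (r0.length : Int) mat

-- ===== PRECONDITION & SPEC =====
-- Pre_ excludes the empty matrix (A raises IndexError) and ragged matrices
-- (A returns the string "ErrorValue", which is not a value of the declared List Int type).
def Pre_row_sums (mat : List (List Int)) : Prop :=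
  mat ≠ [] ∧ mat.all (fun row => row.length = (mat.headD []).length)
instance (mat : List (List Int)) : Decidable (Pre_row_sums mat) := by unfold Pre_row_sums; infer_instance

def pvWitness_row_sums : List (List Int) := [[1, 2], [3, 4]]

def Spec_row_sums (mat : List (List Int)) (out : List Int) : Prop := out = row_sums_alt mat
instance (mat : List (List Int)) (out : List Int) : Decidable (Spec_row_sums mat out) := by unfold Spec_row_sums; infer_instance

-- ===== CLAIM (what is proved, stated in full; the proofs are below) =====
def Claim_equal_row_sums : Prop := ∀ (mat : List (List Int)), Dom_row_sums mat → Pre_row_sums mat → Spec_row_sums mat (row_sums mat)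

-- ===== LEMMAS AND PROOFS =====

theorem rowSumsCheck_of_all (first : Int) (l : List (List Int))
    (h : ∀ row ∈ l, (row.length : Int) = first) : rowSumsCheck first l = true := by
  induction l with
  | nil => rfl
  | cons row rest ih =>
    simp only [rowSumsCheck]
    rw [if_neg, ih]
    · intro r hr; exact h r (List.mem_cons_of_mem _ hr)
    · simp [h row (List.mem_cons_self)]

theorem rowSumsFused_of_all (first : Int) (l : List (List Int))
    (h : ∀ row ∈ l, (row.length : Int) = first) :
    rowSumsFused first l = l.map (fun row => row.foldl (· + ·) 0) := by
  induction l with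
  | nil => rfl
  | cons row rest ih =>
    simp only [rowSumsFused, List.map]
    rw [if_neg, ih]
    · intro r hr; exact h r (List.mem_cons_of_mem _ hr)
    · simp [h row (List.mem_cons_self)]

theorem foldl_push {α β : Type} (f : α → β) : ∀ (l : List α) (acc : List β),
    l.foldl (fun r a => r ++ [f a]) acc = acc ++ l.map f := by
  intro l
  induction l with
  | nil => simp
  | cons a rest ih => intro acc; simp [List.foldl, ih]

theorem foldl_append_sum (mat : List (List Int)) :
    (PySem.List.pyRange 0 (mat.length : Int) 1).foldl
      (fun result i => result ++ [(PySem.List.pyGetD mat i []).foldl (· + ·) 0]) []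
      = mat.map (fun row => row.foldl (· + ·) 0) := by
  have := PySem.List.foldl_pyRange_zero_pyGetD' mat ([] : List Int)
    (fun (result : List Int) (row : List Int) => result ++ [row.foldl (· + ·) 0]) []
  rw [this, foldl_push]
  simp

-- ===== VERDICT (by name: the statement is the Claim_ definition above) =====
theorem row_sums_spec : Claim_equal_row_sums := by
  intro mat _ hpre
  obtain ⟨hne, hall⟩ := hpre
  cases mat with
  | nil => exact absurd rfl hne
  | cons r0 rest =>
    simp only [List.all_eq_true, decide_eq_true_eq, List.headD_cons] at hall
    have hall' : ∀ row ∈ r0 :: rest, (row.length : Int) = (r0.length : Int) := by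
      intro row hr; exact congrArg Int.ofNat (hall row hr)
    unfold Spec_row_sums row_sums row_sums_alt
    have h0 : PySem.List.pyGet? (r0 :: rest) 0 = some r0 := by
      simp [PySem.List.pyGet?, PySem.List.pyIdx?]
    rw [h0]
    simp only [rowSumsCheck_of_all _ _ hall', if_true, if_neg (List.cons_ne_nil r0 rest)]
    rw [foldl_append_sum, rowSumsFused_of_all _ _ hall']
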